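-- pv_equiv track=rewrite | github.com/markusdlugi/aoc-2015 | day11.py | contains_three_increasing
-- ===== SOURCE A (Python) =====
-- def contains_three_increasing(string):
--     prev = None
--     count = 0
--     for char in string:
--         if prev is None or ord(char) == ord(prev) + 1:
--             count += 1
--         else:
--             count = 1
--         if count == 3:
--             return True
--         prev = char
--     return False
-- ===== SOURCE B (Python) =====
-- def contains_three_increasing(string):
--     return any(ord(b) == ord(a) + 1 and ord(c) == ord(b) + 1
--                for a, b, c in zip(string, string[1:], string[2:]))
-- ===== Notes on version B (the rewrite author's own statement) =====
-- stated objective: simpler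
-- what changed: Replaced the stateful scan maintaining prev and a resetting run counter by a stateless any() over sliding windows of three consecutive characters.
import Mathlib
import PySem

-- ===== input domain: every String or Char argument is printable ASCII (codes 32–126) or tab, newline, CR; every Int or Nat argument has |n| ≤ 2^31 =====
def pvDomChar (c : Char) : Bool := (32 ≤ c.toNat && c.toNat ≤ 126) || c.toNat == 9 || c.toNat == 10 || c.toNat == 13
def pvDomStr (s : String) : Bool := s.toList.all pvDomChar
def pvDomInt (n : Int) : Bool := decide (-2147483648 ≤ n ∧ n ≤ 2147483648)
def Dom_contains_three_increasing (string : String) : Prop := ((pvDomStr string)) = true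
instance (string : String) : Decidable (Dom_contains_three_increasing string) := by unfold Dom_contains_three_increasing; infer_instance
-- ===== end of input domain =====

-- B replaces A's prev/count stateful scan with a stateless sliding-window check over triples (objective: simpler).
-- ===== PORT A =====
-- loop of A: state = (prev : Option Char, count); early return on count == 3
def ctiLoopA : List Char → Option Char → Int → Bool
  | [], _, _ => false
  | c :: rest, prev, count =>
    let count' := if prev = none ∨ (∃ p ∈ prev, (c.toNat : Int) = (p.toNat : Int) + 1) then count + 1 else 1
    if count' = 3 then true else ctiLoopA rest (some c) count'

def contains_three_increasing (string : String) : Bool :=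
  ctiLoopA string.toList none 0

-- ===== PORT B =====
-- zip(string, string[1:], string[2:]): recursion over overlapping windows of three
def ctiLoopB : List Char → Bool
  | a :: b :: c :: rest =>
    if (b.toNat : Int) = (a.toNat : Int) + 1 ∧ (c.toNat : Int) = (b.toNat : Int) + 1 then true
    else ctiLoopB (b :: c :: rest)
  | _ => false

def contains_three_increasing_alt (string : String) : Bool :=
  ctiLoopB string.toList

-- ===== PRECONDITION & SPEC =====
def Spec_contains_three_increasing (string : String) (out : Bool) : Prop := out = contains_three_increasing_alt string
instance (string : String) (out : Bool) : Decidable (Spec_contains_three_increasing string out) := by unfold Spec_contains_three_increasing; infer_instance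

-- ===== CLAIM (what is proved, stated in full; the proofs are below) =====
def Claim_equal_contains_three_increasing : Prop := ∀ (string : String), Dom_contains_three_increasing string → Spec_contains_three_increasing string (contains_three_increasing string)

-- ===== LEMMAS AND PROOFS =====
-- a window starting with a non-successor pair can never fire, so B may skip its head
theorem ctiLoopB_skip (x y : Char) (l : List Char)
    (h : ¬((y.toNat : Int) = (x.toNat : Int) + 1)) :
    ctiLoopB (x :: y :: l) = ctiLoopB (y :: l) := by
  cases l <;> simp [ctiLoopB, h]

-- invariant relating A's loop states (count = 1 and count = 2) to B's window scan
theorem ctiLoop_inv (l : List Char) : ∀ a : Char,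
    ctiLoopA l (some a) 1 = ctiLoopB (a :: l) ∧
    ctiLoopA l (some a) 2 =
      (match l with
       | [] => false
       | b :: rest => if (b.toNat : Int) = (a.toNat : Int) + 1 then true else ctiLoopB (b :: rest)) := by
  induction l with
  | nil => intro a; simp [ctiLoopA, ctiLoopB]
  | cons b rest ih =>
    intro a
    constructor
    · by_cases h : (b.toNat : Int) = (a.toNat : Int) + 1
      · calc ctiLoopA (b :: rest) (some a) 1
            = ctiLoopA rest (some b) 2 := by simp [ctiLoopA, h]
          _ = _ := (ih b).2
          _ = ctiLoopB (a :: b :: rest) := by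
              cases rest with
              | nil => simp [ctiLoopB]
              | cons c r =>
                by_cases h2 : (c.toNat : Int) = (b.toNat : Int) + 1
                · simp [ctiLoopB, h, h2]
                · have e1 : ctiLoopB (a :: b :: c :: r) = ctiLoopB (b :: c :: r) := by
                    simp [ctiLoopB, h2]
                  show (if (c.toNat : Int) = (b.toNat : Int) + 1 then true
                         else ctiLoopB (c :: r)) = ctiLoopB (a :: b :: c :: r)
                  rw [if_neg h2, e1, ctiLoopB_skip b c r h2]
      · calc ctiLoopA (b :: rest) (some a) 1
            = ctiLoopA rest (some b) 1 := by simp [ctiLoopA, h]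
          _ = ctiLoopB (b :: rest) := (ih b).1
          _ = ctiLoopB (a :: b :: rest) := (ctiLoopB_skip a b rest h).symm
    · by_cases h : (b.toNat : Int) = (a.toNat : Int) + 1
      · simp [ctiLoopA, h]
      · show _ = if (b.toNat : Int) = (a.toNat : Int) + 1 then true else ctiLoopB (b :: rest)
        rw [if_neg h]
        calc ctiLoopA (b :: rest) (some a) 2
            = ctiLoopA rest (some b) 1 := by simp [ctiLoopA, h]
          _ = ctiLoopB (b :: rest) := (ih b).1

-- ===== VERDICT (by name: the statement is the Claim_ definition above) =====
theorem contains_three_increasing_spec : Claim_equal_contains_three_increasing := by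
  intro s _
  unfold Spec_contains_three_increasing contains_three_increasing contains_three_increasing_alt
  cases h : s.toList with
  | nil => simp [ctiLoopA, ctiLoopB]
  | cons c rest =>
    have := (ctiLoop_inv rest c).1
    simp [ctiLoopA, this]
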